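-- pv_equiv track=rewrite | github.com/DerZander/AdventOfPython | src/years/year2024/day07/solution.py | calculate_answer_one
-- ===== SOURCE A (Python) =====
-- def calculate_answer_one(values, key):
--     is_ok = False
--     for i in range(2 ** (len(values) - 1)):
--         result = values[0]
--         for j in range(len(values) - 1):
--             if (i >> j) & 1 == 1:
--                 result *= values[j + 1]
--             else:
--                 result += values[j + 1]
--         if result == key:
--             is_ok = True
--             break
--     if is_ok:
--         return key
--     else:
--         return 0
-- ===== SOURCE B (Python) =====
-- def calculate_answer_one(values, key):
--     reach = {values[0]}
--     for v in values[1:]: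
--         reach = {r + v for r in reach} | {r * v for r in reach}
--     return key if key in reach else 0
-- ===== Notes on version B (the rewrite author's own statement) =====
-- stated objective: faster
-- what changed: A enumerates all 2^(n-1) operator bitmasks, re-evaluating the whole expression for each; B folds once over the tail maintaining the deduplicated set of reachable values, so work is O(n * |reachable set|) instead of O(2^n * n).
-- outside the precondition, e.g. on calculate_answer_one([], 5): A raises TypeError, B raises IndexError
import Mathlib
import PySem

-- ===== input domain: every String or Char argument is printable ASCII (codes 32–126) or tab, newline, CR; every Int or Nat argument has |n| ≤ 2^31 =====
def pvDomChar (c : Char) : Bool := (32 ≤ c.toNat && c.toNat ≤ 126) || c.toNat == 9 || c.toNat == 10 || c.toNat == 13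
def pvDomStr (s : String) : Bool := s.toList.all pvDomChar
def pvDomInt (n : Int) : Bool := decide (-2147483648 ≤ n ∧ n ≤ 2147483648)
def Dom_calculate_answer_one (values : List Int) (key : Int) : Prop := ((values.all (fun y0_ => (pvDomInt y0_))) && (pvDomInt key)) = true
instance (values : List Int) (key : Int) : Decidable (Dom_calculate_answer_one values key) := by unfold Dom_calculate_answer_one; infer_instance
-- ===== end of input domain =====

-- B replaces A's enumeration of all 2^(n-1) operator combinations by a forward
-- reachable-value set with dedup (a Python set), folded once over the tail.

-- ===== PORT A =====
-- inner loop: result = values[0]; for j in range(len(values)-1): result op= values[j+1]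
-- (values[j+1] is always in range here, so pyGetD with default 0 is exact)
def pvAInner (values : List Int) (i : Int) : Int :=
  (PySem.List.pyRange 0 ((values.length : Int) - 1) 1).foldl
    (fun result j =>
      if PySem.Int.band (i >>> j.toNat) 1 = 1
      then result * PySem.List.pyGetD values (j + 1) 0
      else result + PySem.List.pyGetD values (j + 1) 0)
    (PySem.List.pyGetD values 0 0)

-- outer loop with its `break`: stop at the first i whose result equals key
def pvALoop (values : List Int) (key : Int) : List Int → Bool
  | [] => false
  | i :: rest => if pvAInner values i = key then true else pvALoop values key rest

def calculate_answer_one (values : List Int) (key : Int) : Int :=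
  if pvALoop values key (PySem.List.pyRange 0 ((2 : Int) ^ (values.length - 1)) 1)
  then key else 0

-- ===== PORT B =====
-- reach = {r + v for r in reach} | {r * v for r in reach}
def pvBStep (s : PySem.Set Int) (v : Int) : PySem.Set Int :=
  PySem.Set.union (PySem.Set.ofList (s.map (fun r => r + v))) (s.map (fun r => r * v))

def calculate_answer_one_alt (values : List Int) (key : Int) : Int :=
  let reach := (PySem.List.slice values (some 1) none).foldl pvBStep
      (PySem.Set.ofList [PySem.List.pyGetD values 0 0])
  if PySem.Set.contains reach key then key else 0

-- ===== PRECONDITION & SPEC =====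
-- A raises on the empty list (range(2 ** -1) is a TypeError); B raises there too (values[0]).
def Pre_calculate_answer_one (values : List Int) (_key : Int) : Prop := values ≠ []
instance (values : List Int) (key : Int) : Decidable (Pre_calculate_answer_one values key) := by
  unfold Pre_calculate_answer_one; infer_instance
def pvWitness_calculate_answer_one : List Int × Int := ([1, 2, 3], 9)

def Spec_calculate_answer_one (values : List Int) (key : Int) (out : Int) : Prop := out = calculate_answer_one_alt values key
instance (values : List Int) (key : Int) (out : Int) : Decidable (Spec_calculate_answer_one values key out) := by unfold Spec_calculate_answer_one; infer_instance

-- ===== CLAIM (what is proved, stated in full; the proofs are below) =====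
def Claim_equal_calculate_answer_one : Prop := ∀ (values : List Int) (key : Int), Dom_calculate_answer_one values key → Pre_calculate_answer_one values key → Spec_calculate_answer_one values key (calculate_answer_one values key)

-- ===== LEMMAS AND PROOFS =====

-- reference evaluator: apply the ops encoded in the bits of i (from bit k on) to acc
def pvEval (i : Nat) (k : Nat) (acc : Int) : List Int → Int
  | [] => acc
  | v :: vs => pvEval i (k + 1) (if (i >>> k) % 2 = 1 then acc * v else acc + v) vs

lemma pvBand_iff (i c : Nat) : (PySem.Int.band (((i : Nat) : Int) >>> ((c : Nat) : Int)) 1 = 1) ↔ ((i >>> c) % 2 = 1) := by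
  rw [Int.shiftRight_natCast]
  have h2 : PySem.Int.band ((i >>> c : Nat) : Int) 1 = (((i >>> c) &&& 1 : Nat) : Int) := by
    exact_mod_cast PySem.Int.band_natCast (i >>> c) 1
  rw [h2, Nat.and_one_is_mod]
  constructor
  · intro h; exact_mod_cast h
  · intro h; exact_mod_cast h

lemma pvALoop_iff (values : List Int) (key : Int) (l : List Int) :
    pvALoop values key l = true ↔ ∃ i ∈ l, pvAInner values i = key := by
  induction l with
  | nil => simp [pvALoop]
  | cons i rest ih =>
    by_cases h : pvAInner values i = key <;> simp [pvALoop, h, ih]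

lemma pvEval_shift (vs : List Int) : ∀ (i k : Nat) (acc : Int),
    pvEval i (k + 1) acc vs = pvEval (i >>> 1) k acc vs := by
  induction vs with
  | nil => intro i k acc; rfl
  | cons v vs ih =>
    intro i k acc
    have hb : i >>> (k + 1) = (i >>> 1) >>> k := by
      rw [← Nat.shiftRight_add]; ring_nf
    simp only [pvEval, hb, ih]

lemma pvInner_gen (vs : List Int) : ∀ (values : List Int) (c : Nat) (acc : Int) (i : Nat),
    values.drop (c + 1) = vs → c + 1 ≤ values.length →
    (PySem.List.pyRange (c : Int) ((values.length : Int) - 1) 1).foldl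
      (fun result j =>
        if PySem.Int.band (((i : Nat) : Int) >>> j.toNat) 1 = 1
        then result * PySem.List.pyGetD values (j + 1) 0
        else result + PySem.List.pyGetD values (j + 1) 0) acc
    = pvEval i c acc vs := by
  induction vs with
  | nil =>
    intro values c acc i hd hc
    have hlen : values.length = c + 1 := by
      have := congrArg List.length hd
      simp at this; omega
    rw [PySem.List.pyRange_one_eq_nil (by omega)]
    rfl
  | cons v vs ih =>
    intro values c acc i hd hc
    have hcl : c + 1 < values.length := by
      have := congrArg List.length hd
      simp at this; omega
    rw [PySem.List.pyRange_one_cons (by omega)]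
    simp only [List.foldl_cons, Int.toNat_natCast]
    have hget : PySem.List.pyGetD values ((c : Int) + 1) 0 = v := by
      have h1 : values[c + 1]'hcl = v := by
        have : (values.drop (c + 1))[0]'(by simp [hd]) = v := by simp [hd]
        simpa using this
      have h2 := PySem.List.pyGetD_eq_getElem values (i := ((c + 1 : Nat) : Int)) 0
        (by positivity) (by exact_mod_cast hcl)
      simp only [Int.toNat_natCast] at h2
      rw [h1] at h2
      push_cast at h2
      exact h2
    rw [hget]
    have hdrop : values.drop (c + 1 + 1) = vs := by
      have : (values.drop (c + 1)).drop 1 = vs := by simp [hd]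
      simpa [List.drop_drop, Nat.add_comm] using this
    by_cases hb : (i >>> c) % 2 = 1
    · rw [if_pos ((pvBand_iff i c).mpr hb)]
      have := ih values (c + 1) (acc * v) i hdrop (by omega)
      push_cast at this ⊢
      rw [this]
      simp [pvEval, hb]
    · rw [if_neg (fun h => hb ((pvBand_iff i c).mp h))]
      have := ih values (c + 1) (acc + v) i hdrop (by omega)
      push_cast at this ⊢
      rw [this]
      simp [pvEval, hb]

lemma pvBStep_mem (s : PySem.Set Int) (v y : Int) :
    y ∈ pvBStep s v ↔ ∃ r ∈ s, y = r + v ∨ y = r * v := by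
  simp only [pvBStep, PySem.Set.mem_union, PySem.Set.mem_ofList, List.mem_map]
  constructor
  · rintro (⟨r, hr, h⟩ | ⟨r, hr, h⟩)
    · exact ⟨r, hr, Or.inl h.symm⟩
    · exact ⟨r, hr, Or.inr h.symm⟩
  · rintro ⟨r, hr, h | h⟩
    · exact Or.inl ⟨r, hr, h.symm⟩
    · exact Or.inr ⟨r, hr, h.symm⟩

lemma pvReach_iff (vs : List Int) : ∀ (s : PySem.Set Int) (key : Int),
    key ∈ vs.foldl pvBStep s ↔
      ∃ r ∈ s, ∃ i : Nat, i < 2 ^ vs.length ∧ pvEval i 0 r vs = key := by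
  induction vs with
  | nil =>
    intro s key
    constructor
    · intro h; exact ⟨key, h, 0, by norm_num, rfl⟩
    · rintro ⟨r, hr, i, hi, he⟩
      simpa [pvEval] using he ▸ hr
  | cons v vs ih =>
    intro s key
    simp only [List.foldl_cons, ih, pvBStep_mem]
    have hpow : 2 ^ (v :: vs).length = 2 * 2 ^ vs.length := by
      simp [List.length_cons, Nat.pow_succ, Nat.mul_comm]
    constructor
    · rintro ⟨r', ⟨r, hr, hcase⟩, i, hi, he⟩
      rcases hcase with h | h
      · refine ⟨r, hr, 2 * i, by omega, ?_⟩
        have h0 : (2 * i) >>> 0 % 2 = 0 := by omega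
        have h1 : (2 * i) >>> 1 = i := by omega
        simp only [pvEval, h0, pvEval_shift, h1]
        simpa [h] using he
      · refine ⟨r, hr, 2 * i + 1, by omega, ?_⟩
        have h0 : (2 * i + 1) >>> 0 % 2 = 1 := by omega
        have h1 : (2 * i + 1) >>> 1 = i := by omega
        simp only [pvEval, h0, pvEval_shift, h1]
        simpa [h] using he
    · rintro ⟨r, hr, i, hi, he⟩
      simp only [pvEval, pvEval_shift] at he
      have hhalf : i >>> 1 < 2 ^ vs.length := by
        have := Nat.shiftRight_one i
        omega
      by_cases hb : i % 2 = 1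
      · refine ⟨r * v, ⟨r, hr, Or.inr rfl⟩, i >>> 1, hhalf, ?_⟩
        simpa [hb] using he
      · refine ⟨r + v, ⟨r, hr, Or.inl rfl⟩, i >>> 1, hhalf, ?_⟩
        simpa [hb] using he

-- ===== VERDICT (by name: the statement is the Claim_ definition above) =====
theorem calculate_answer_one_spec : Claim_equal_calculate_answer_one := by
  intro values key _ hpre
  obtain ⟨v0, rest, rfl⟩ : ∃ v0 rest, values = v0 :: rest := by
    cases values with
    | nil => exact absurd rfl hpre
    | cons a b => exact ⟨a, b, rfl⟩
  unfold Spec_calculate_answer_one calculate_answer_one calculate_answer_one_alt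
  have hslice : PySem.List.slice (v0 :: rest) (some 1) none = rest := by
    simp [PySem.List.slice_from]
  have hget0 : PySem.List.pyGetD (v0 :: rest) 0 0 = v0 := by
    simp [pysem]
  have hofL : PySem.Set.ofList [v0] = [v0] := rfl
  have hmain : pvALoop (v0 :: rest) key
        (PySem.List.pyRange 0 ((2 : Int) ^ ((v0 :: rest).length - 1)) 1) = true
      ↔ key ∈ rest.foldl pvBStep ([v0] : PySem.Set Int) := by
    rw [pvALoop_iff, pvReach_iff]
    have hlen1 : (v0 :: rest).length - 1 = rest.length := by simp
    constructor
    · rintro ⟨i, hi, he⟩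
      rw [PySem.List.mem_pyRange_one] at hi
      obtain ⟨h0, hlt⟩ := hi
      rw [hlen1] at hlt
      refine ⟨v0, by simp, i.toNat, ?_, ?_⟩
      · have : ((i.toNat : Nat) : Int) < (2 : Int) ^ rest.length := by
          rwa [Int.toNat_of_nonneg h0]
        exact_mod_cast this
      · have hg := pvInner_gen rest (v0 :: rest) 0 v0 i.toNat (by simp) (by simp)
        rw [← he]
        unfold pvAInner
        rw [hget0]
        simp only [Nat.cast_zero] at hg
        rw [Int.toNat_of_nonneg h0] at hg
        exact hg.symm
    · rintro ⟨r, hr, i, hi, he⟩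
      have hr0 : r = v0 := by simpa using hr
      rw [hr0] at he
      refine ⟨(i : Int), ?_, ?_⟩
      · rw [PySem.List.mem_pyRange_one, hlen1]
        exact ⟨Int.natCast_nonneg i, by exact_mod_cast hi⟩
      · have hg := pvInner_gen rest (v0 :: rest) 0 v0 i (by simp) (by simp)
        unfold pvAInner
        rw [hget0]
        simp only [Nat.cast_zero] at hg
        rw [hg, he]
  rw [hslice, hget0, hofL]
  by_cases h : key ∈ rest.foldl pvBStep ([v0] : PySem.Set Int)
  · rw [if_pos (hmain.mpr h), if_pos (by rw [PySem.Set.contains_iff]; exact h)]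
  · rw [if_neg (fun hh => h (hmain.mp hh)),
        if_neg (by rw [PySem.Set.contains_iff]; exact h)]
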